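-- pv_equiv track=rewrite | github.com/juye-ops/algorithm | 신고_결과_받기.py | solution
-- ===== SOURCE A (Python) =====
-- def solution(id_list, report, k):
--     answer = []
--     ids={x:[] for x in id_list}
--     cnt = {x: 0 for x in id_list}
--     report = list(set(report))
--     for i in report:
--         a, b = i.split(" ") #a reported b
--         ids[b].append(a)
--     for i in ids:
--         if len(ids[i]) >= k:
--             for j in ids[i]:
--                 cnt[j] += 1
--     return list(cnt.values())
-- ===== SOURCE B (Python) =====
-- def solution(id_list, report, k):
--     reports = list(set(report))
--     cnt = {x: 0 for x in id_list}
--     for r in reports: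
--         a, b = r.split(" ")
--         cnt[b] += 1
--     suspended = {b for b in cnt if cnt[b] >= k}
--     answer = {x: 0 for x in id_list}
--     for r in reports:
--         a, b = r.split(" ")
--         if b in suspended:
--             answer[a] += 1
--     return list(answer.values())
-- ===== Notes on version B (the rewrite author's own statement) =====
-- stated objective: alternative
-- what changed: B replaces A's grouping of reporters into per-target lists (and a nested loop over those groups) with two flat passes over the deduped reports: a counter per reported user, a suspended set, then a second scan incrementing each reporter of a suspended target.
import Mathlib
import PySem

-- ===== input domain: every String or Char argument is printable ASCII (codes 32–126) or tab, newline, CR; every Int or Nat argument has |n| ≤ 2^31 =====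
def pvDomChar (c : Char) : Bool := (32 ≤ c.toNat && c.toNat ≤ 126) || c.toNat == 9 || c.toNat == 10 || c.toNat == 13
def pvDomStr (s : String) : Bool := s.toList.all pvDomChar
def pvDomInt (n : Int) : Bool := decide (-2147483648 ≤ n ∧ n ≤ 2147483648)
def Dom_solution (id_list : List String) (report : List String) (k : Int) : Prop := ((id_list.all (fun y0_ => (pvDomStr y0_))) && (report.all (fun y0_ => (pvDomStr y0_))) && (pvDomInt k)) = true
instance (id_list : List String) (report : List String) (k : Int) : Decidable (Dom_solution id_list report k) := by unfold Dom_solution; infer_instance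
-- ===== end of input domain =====

-- B replaces A's per-target reporter lists (grouping + nested loop) by two flat counting passes
-- over the deduped reports; equivalence proved on Pre_ = exactly the inputs where the Python A returns.


-- shared helper: `a, b = r.split(" ")` — some (a, b) iff the split has exactly two parts
def pvSplit2? (r : String) : Option (String × String) :=
  match PySem.Str.split? r " " with
  | some [a, b] => some (a, b)
  | _ => none

-- `{x: v for x in l}`
def pvSeed {ν : Type} (l : List String) (v : ν) : PySem.Dict String ν :=
  l.foldl (fun d x => d.insert x v) PySem.Dict.empty

-- ===== PORT A =====
-- `for i in report: a, b = i.split(" "); ids[b].append(a)`  (KeyError/ValueError excluded by Pre_)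
def pvGroupLoop (rep : List String) (ids : PySem.Dict String (List String)) : PySem.Dict String (List String) :=
  rep.foldl (fun d i =>
    match pvSplit2? i with
    | some (a, b) => d.modify b [] (fun l => l ++ [a])
    | none => d) ids

-- `for i in ids: if len(ids[i]) >= k: for j in ids[i]: cnt[j] += 1`  (KeyError excluded by Pre_)
def pvCntLoop (k : Int) (items : List (String × List String)) (cnt : PySem.Dict String Int) : PySem.Dict String Int :=
  items.foldl (fun c p =>
    if k ≤ (p.2.length : Int) then p.2.foldl (fun c j => c.modify j 0 (· + 1)) c else c) cnt

def solution (id_list : List String) (report : List String) (k : Int) : List Int :=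
  -- `answer = []` in A is dead code; report = list(set(report))
  let rep : List String := PySem.Set.ofList report
  let ids2 := pvGroupLoop rep (pvSeed id_list [])
  (pvCntLoop k ids2.items (pvSeed id_list 0)).values

-- ===== PORT B =====
-- first pass: `for r in reports: a, b = r.split(" "); cnt[b] += 1`  (KeyError/ValueError excluded by Pre_)
def pvTargetCntLoop (rep : List String) (cnt : PySem.Dict String Int) : PySem.Dict String Int :=
  rep.foldl (fun c r =>
    match pvSplit2? r with
    | some (_, b) => c.modify b 0 (· + 1)
    | none => c) cnt

-- `suspended = {b for b in cnt if cnt[b] >= k}`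
def pvSuspOf (k : Int) (cnt : PySem.Dict String Int) : PySem.Set String :=
  PySem.Set.ofList ((cnt.items.filter (fun p => decide (k ≤ p.2))).map Prod.fst)

-- second pass: `for r in reports: a, b = r.split(" ");  if b in suspended: answer[a] += 1`
def pvAnsLoop (susp : PySem.Set String) (rep : List String) (ans : PySem.Dict String Int) : PySem.Dict String Int :=
  rep.foldl (fun c r =>
    match pvSplit2? r with
    | some (a, b) => if PySem.Set.contains susp b then c.modify a 0 (· + 1) else c
    | none => c) ans

def solution_alt (id_list : List String) (report : List String) (k : Int) : List Int :=
  let rep : List String := PySem.Set.ofList report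
  let cnt2 := pvTargetCntLoop rep (pvSeed id_list 0)
  (pvAnsLoop (pvSuspOf k cnt2) rep (pvSeed id_list 0)).values

-- ===== PRECONDITION & SPEC =====
-- number of DISTINCT reports whose second token is b (a closed form on the input)
def pvTcnt (report : List String) (b : String) : Nat :=
  ((PySem.List.dedup report).filter (fun r => (pvSplit2? r).map Prod.snd == some b)).length

-- Pre_ holds exactly where the Python A returns: every report is "a b" (else ValueError),
-- every reported user b is in id_list (else KeyError), and every reporter of a user with
-- ≥ k distinct reports is in id_list (else KeyError in A's second loop).
def Pre_solution (id_list : List String) (report : List String) (k : Int) : Prop :=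
  ∀ r ∈ report,
    (match pvSplit2? r with
     | some (a, b) =>
         decide (b ∈ id_list) && (!decide (k ≤ (pvTcnt report b : Int)) || decide (a ∈ id_list))
     | none => false) = true
instance (id_list : List String) (report : List String) (k : Int) : Decidable (Pre_solution id_list report k) := by unfold Pre_solution; infer_instance

def pvWitness_solution : List String × List String × Int := (["muzi", "frodo"], ["muzi frodo", "frodo muzi"], 1)

def Spec_solution (id_list : List String) (report : List String) (k : Int) (out : List Int) : Prop := out = solution_alt id_list report k
instance (id_list : List String) (report : List String) (k : Int) (out : List Int) : Decidable (Spec_solution id_list report k out) := by unfold Spec_solution; infer_instance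

-- ===== CLAIM (what is proved, stated in full; the proofs are below) =====
def Claim_equal_solution : Prop := ∀ (id_list : List String) (report : List String) (k : Int), Dom_solution id_list report k → Pre_solution id_list report k → Spec_solution id_list report k (solution id_list report k)

-- ===== LEMMAS AND PROOFS =====

-- first / second token of a well-formed report
def pvT1 (r : String) : String := ((pvSplit2? r).getD ("", "")).1
def pvT2 (r : String) : String := ((pvSplit2? r).getD ("", "")).2

-- distinct reports targeting b
def pvCnt (report : List String) (b : String) : Nat := (PySem.Set.ofList report).countP (fun r => pvT2 r == b)
-- "b is suspended"
def pvP (report : List String) (k : Int) (b : String) : Bool := decide (k ≤ (pvCnt report b : Int))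
-- the common middle form both ports are reduced to
def pvMid (id_list report : List String) (k : Int) : List Int :=
  (PySem.Set.ofList id_list).map
    (fun x => ((PySem.Set.ofList report).countP (fun r => pvT1 r == x && pvP report k (pvT2 r)) : Int))

theorem pv_seed_getD_aux {ν : Type} (l : List String) (d : PySem.Dict String ν) (v : ν) (y : String) (dflt : ν) :
    (l.foldl (fun d x => d.insert x v) d).getD y dflt = if y ∈ l then v else d.getD y dflt := by
  induction l generalizing d with
  | nil => simp
  | cons a t ih =>
    rw [List.foldl_cons, ih]
    by_cases h : y ∈ t
    · simp [h]
    · by_cases h2 : y = a <;> simp [h, h2, PySem.Dict.getD_insert]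

theorem pv_seed_getD {ν : Type} (l : List String) (v : ν) (y : String) (dflt : ν) :
    (pvSeed l v).getD y dflt = if y ∈ l then v else dflt := by
  rw [pvSeed, pv_seed_getD_aux]
  simp [PySem.Dict.getD_empty]

theorem pv_seed_keys {ν : Type} (l : List String) (v : ν) :
    (pvSeed l v).keys = PySem.Set.ofList l := by
  rw [pvSeed]
  have h := PySem.Dict.keys_foldl_insert l (fun _ _ => v) PySem.Dict.empty
  simpa [PySem.Set.update, PySem.Set.ofList_eq_foldl] using h

theorem pv_update_of_subset (xs s : List String) (h : ∀ x ∈ xs, x ∈ s) :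
    PySem.Set.update s xs = s := by
  induction xs generalizing s with
  | nil => rfl
  | cons a t ih =>
    have h1 : PySem.Set.add s a = s := PySem.Set.add_of_mem (h a (by simp))
    simp only [PySem.Set.update, List.foldl_cons] at *
    rw [h1]
    exact ih s (fun x hx => h x (List.mem_cons_of_mem _ hx))

-- A's grouping loop, value at a key
theorem pv_group_getD (rep : List String) (ids : PySem.Dict String (List String)) (b : String)
    (hwf : ∀ r ∈ rep, pvSplit2? r = some (pvT1 r, pvT2 r)) :
    (pvGroupLoop rep ids).getD b []
      = ids.getD b [] ++ (rep.filter (fun r => pvT2 r == b)).map pvT1 := by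
  rw [pvGroupLoop,
    PySem.List.foldl_congr_mem rep _ (fun d r => d.modify (pvT2 r) [] (fun l => l ++ [pvT1 r])) ids
      (by intro acc r hr; rw [hwf r hr])]
  have h2 : rep.foldl (fun d r => d.modify (pvT2 r) [] (fun l => l ++ [pvT1 r])) ids
      = (rep.map (fun r => (pvT2 r, pvT1 r))).foldl (fun d p => d.modify p.1 [] (fun l => l ++ [p.2])) ids :=
    by rw [List.foldl_map]
  rw [h2, PySem.Dict.getD_foldl_modify_append, List.filter_map, List.map_map]
  rfl

theorem pv_group_keys (rep : List String) (ids : PySem.Dict String (List String))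
    (hwf : ∀ r ∈ rep, pvSplit2? r = some (pvT1 r, pvT2 r)) :
    (pvGroupLoop rep ids).keys = PySem.Set.update ids.keys (rep.map pvT2) := by
  rw [pvGroupLoop,
    PySem.List.foldl_congr_mem rep _ (fun d r => d.modify (pvT2 r) [] (fun l => l ++ [pvT1 r])) ids
      (by intro acc r hr; rw [hwf r hr])]
  exact PySem.Dict.keys_foldl_modify_key rep pvT2 [] (fun _ r => fun l => l ++ [pvT1 r]) ids

-- A's counting loop, value at a key
theorem pv_cnt_outer (k : Int) (L : List (String × List String)) (c : PySem.Dict String Int) (x : String) :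
    (pvCntLoop k L c).getD x 0
      = c.getD x 0 + (L.map (fun p => if k ≤ (p.2.length : Int) then (p.2.count x : Int) else 0)).sum := by
  induction L generalizing c with
  | nil => simp [pvCntLoop]
  | cons p t ih =>
    rw [pvCntLoop, List.foldl_cons, ← pvCntLoop, ih, List.map_cons, List.sum_cons]
    by_cases hk : k ≤ (p.2.length : Int)
    · rw [if_pos hk, if_pos hk, PySem.Dict.getD_foldl_modify_add_one]
      ring
    · rw [if_neg hk, if_neg hk]
      ring

theorem pv_cnt_outer_keys (k : Int) (L : List (String × List String)) (c : PySem.Dict String Int)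
    (h : ∀ p ∈ L, k ≤ (p.2.length : Int) → ∀ j ∈ p.2, j ∈ c.keys) :
    (pvCntLoop k L c).keys = c.keys := by
  induction L generalizing c with
  | nil => rfl
  | cons p t ih =>
    rw [pvCntLoop, List.foldl_cons, ← pvCntLoop]
    by_cases hk : k ≤ (p.2.length : Int)
    · rw [if_pos hk]
      have hkeys : (p.2.foldl (fun c j => c.modify j 0 (· + 1)) c).keys = c.keys := by
        have h1 : (p.2.foldl (fun c j => c.modify j 0 (· + 1)) c).keys
            = PySem.Set.update c.keys (p.2.map (fun j => j)) :=
          PySem.Dict.keys_foldl_modify_key p.2 (fun j => j) 0 (fun _ _ v => v + 1) c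
        rw [h1, List.map_id']
        exact pv_update_of_subset _ _ (h p (by simp) hk)
      rw [ih _ (by intro q hq hkq j hj; rw [hkeys]; exact h q (List.mem_cons_of_mem _ hq) hkq j hj), hkeys]
    · rw [if_neg hk]
      exact ih _ (fun q hq => h q (List.mem_cons_of_mem _ hq))

-- B's first pass, value at a key
theorem pv_tgtcnt_getD (rep : List String) (cnt : PySem.Dict String Int) (b : String)
    (hwf : ∀ r ∈ rep, pvSplit2? r = some (pvT1 r, pvT2 r)) :
    (pvTargetCntLoop rep cnt).getD b 0 = cnt.getD b 0 + (rep.countP (fun r => pvT2 r == b) : Int) := by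
  rw [pvTargetCntLoop,
    PySem.List.foldl_congr_mem rep _ (fun c r => c.modify (pvT2 r) 0 (· + 1)) cnt
      (by intro acc r hr; rw [hwf r hr])]
  have h2 : rep.foldl (fun c r => c.modify (pvT2 r) 0 (· + 1)) cnt
      = (rep.map pvT2).foldl (fun c j => c.modify j 0 (· + 1)) cnt :=
    by rw [List.foldl_map]
  rw [h2, PySem.Dict.getD_foldl_modify_add_one, List.count, List.countP_map]
  rfl

theorem pv_tgtcnt_keys (rep : List String) (cnt : PySem.Dict String Int)
    (hwf : ∀ r ∈ rep, pvSplit2? r = some (pvT1 r, pvT2 r)) :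
    (pvTargetCntLoop rep cnt).keys = PySem.Set.update cnt.keys (rep.map pvT2) := by
  rw [pvTargetCntLoop,
    PySem.List.foldl_congr_mem rep _ (fun c r => c.modify (pvT2 r) 0 (· + 1)) cnt
      (by intro acc r hr; rw [hwf r hr])]
  exact PySem.Dict.keys_foldl_modify_key rep pvT2 0 (fun _ _ v => v + 1) cnt

-- membership in B's suspended set
theorem pv_susp_contains (k : Int) (cnt : PySem.Dict String Int) (hnd : cnt.keys.Nodup) (b : String) :
    PySem.Set.contains (pvSuspOf k cnt) b = true ↔ b ∈ cnt.keys ∧ k ≤ cnt.getD b 0 := by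
  rw [pvSuspOf, PySem.Set.contains_iff, PySem.Set.mem_ofList,
    PySem.Dict.items_eq_map_keys cnt hnd 0, List.filter_map, List.map_map, List.mem_map]
  constructor
  · rintro ⟨c, hc, rfl⟩
    have := (List.mem_filter.mp hc)
    refine ⟨this.1, by simpa using this.2⟩
  · rintro ⟨hb, hk⟩
    exact ⟨b, List.mem_filter.mpr ⟨hb, by simpa using hk⟩, rfl⟩

-- B's second pass, value at a key
theorem pv_ansloop_getD (susp : PySem.Set String) (rep : List String) (ans : PySem.Dict String Int) (x : String)
    (hwf : ∀ r ∈ rep, pvSplit2? r = some (pvT1 r, pvT2 r)) :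
    (pvAnsLoop susp rep ans).getD x 0
      = ans.getD x 0 + (rep.countP (fun r => pvT1 r == x && PySem.Set.contains susp (pvT2 r)) : Int) := by
  rw [pvAnsLoop,
    PySem.List.foldl_congr_mem rep _
      (fun c r => if PySem.Set.contains susp (pvT2 r) then c.modify (pvT1 r) 0 (· + 1) else c) ans
      (by intro acc r hr; rw [hwf r hr])]
  have h2 : rep.foldl (fun c r => if PySem.Set.contains susp (pvT2 r) then c.modify (pvT1 r) 0 (· + 1) else c) ans
      = (rep.filter (fun r => PySem.Set.contains susp (pvT2 r))).foldl (fun c r => c.modify (pvT1 r) 0 (· + 1)) ans :=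
    List.foldl_filter.symm
  have h3 : (rep.filter (fun r => PySem.Set.contains susp (pvT2 r))).foldl (fun c r => c.modify (pvT1 r) 0 (· + 1)) ans
      = ((rep.filter (fun r => PySem.Set.contains susp (pvT2 r))).map pvT1).foldl (fun c j => c.modify j 0 (· + 1)) ans :=
    by rw [List.foldl_map]
  rw [h2, h3, PySem.Dict.getD_foldl_modify_add_one, List.count, List.countP_map, List.countP_filter]
  rfl

theorem pv_ansloop_keys (susp : PySem.Set String) (rep : List String) (ans : PySem.Dict String Int)
    (hwf : ∀ r ∈ rep, pvSplit2? r = some (pvT1 r, pvT2 r)) :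
    (pvAnsLoop susp rep ans).keys
      = PySem.Set.update ans.keys ((rep.filter (fun r => PySem.Set.contains susp (pvT2 r))).map pvT1) := by
  rw [pvAnsLoop,
    PySem.List.foldl_congr_mem rep _
      (fun c r => if PySem.Set.contains susp (pvT2 r) then c.modify (pvT1 r) 0 (· + 1) else c) ans
      (by intro acc r hr; rw [hwf r hr])]
  have h2 : rep.foldl (fun c r => if PySem.Set.contains susp (pvT2 r) then c.modify (pvT1 r) 0 (· + 1) else c) ans
      = (rep.filter (fun r => PySem.Set.contains susp (pvT2 r))).foldl (fun c r => c.modify (pvT1 r) 0 (· + 1)) ans :=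
    List.foldl_filter.symm
  rw [h2]
  exact PySem.Dict.keys_foldl_modify_key _ pvT1 0 (fun _ _ v => v + 1) ans

theorem pv_single_hit (D : List String) (hnd : D.Nodup) (c : String) (hc : c ∈ D) (v : Int) :
    (D.map (fun b => if b = c then v else 0)).sum = v := by
  induction D with
  | nil => cases hc
  | cons a t ih =>
    rw [List.map_cons, List.sum_cons]
    by_cases hac : a = c
    · rw [if_pos hac]
      have hcnot : c ∉ t := hac ▸ (List.nodup_cons.mp hnd).1
      have hz : (t.map (fun b => if b = c then v else 0)).sum = 0 := by
        apply List.sum_eq_zero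
        intro y hy
        obtain ⟨b, hb, rfl⟩ := List.mem_map.mp hy
        have : b ≠ c := fun he => hcnot (he ▸ hb)
        simp [this]
      rw [hz]; ring
    · rw [if_neg hac]
      have hct : c ∈ t := by
        rcases List.mem_cons.mp hc with h | h
        · exact absurd h.symm hac
        · exact h
      rw [ih (List.nodup_cons.mp hnd).2 hct]
      ring

theorem pv_exchange (D : List String) (hnd : D.Nodup) (P : String → Bool) (t1 t2 : String → String) (x : String)
    (L : List String) (hL : ∀ r ∈ L, t2 r ∈ D) :
    (D.map (fun b => if P b then (L.countP (fun r => t1 r == x && t2 r == b) : Int) else 0)).sum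
      = (L.countP (fun r => t1 r == x && P (t2 r)) : Int) := by
  induction L with
  | nil => simp
  | cons r t ih =>
    have hr := hL r (by simp)
    have ht : ∀ r' ∈ t, t2 r' ∈ D := fun r' h => hL r' (List.mem_cons_of_mem _ h)
    have hsplit : ∀ b, (if P b then ((t.countP (fun r' => t1 r' == x && t2 r' == b)
          + if (t1 r == x && t2 r == b) = true then 1 else 0 : Nat) : Int) else 0)
        = (if P b then (t.countP (fun r' => t1 r' == x && t2 r' == b) : Int) else 0)
          + (if b = t2 r then (if (t1 r == x && P (t2 r)) = true then (1 : Int) else 0) else 0) := by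
      intro b
      by_cases hb : b = t2 r
      · subst hb
        by_cases hP : P (t2 r) <;> by_cases hx : t1 r == x <;> simp [hP, hx]
      · have : (t2 r == b) = false := by
          simp only [beq_eq_false_iff_ne]; exact fun he => hb he.symm
        by_cases hP : P b <;> simp [hP, this, hb]
    rw [List.countP_cons]
    simp only [List.countP_cons, hsplit]
    rw [PySem.List.sum_map_add_int, ih ht, pv_single_hit D hnd (t2 r) hr]
    by_cases hx : (t1 r == x && P (t2 r)) = true <;> simp [hx]

-- facts extracted from Pre_
theorem pv_pre_facts (id_list report : List String) (k : Int) (hpre : Pre_solution id_list report k) :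
    ∀ r ∈ PySem.Set.ofList report, pvSplit2? r = some (pvT1 r, pvT2 r) ∧ pvT2 r ∈ id_list ∧
      (pvP report k (pvT2 r) = true → pvT1 r ∈ id_list) := by
  have hwf : ∀ r' ∈ report, pvSplit2? r' = some (pvT1 r', pvT2 r') := by
    intro r' hr'
    have h := hpre r' hr'
    cases hs : pvSplit2? r' with
    | none => rw [hs] at h; simp at h
    | some p => simp [pvT1, pvT2, hs]
  have htcnt : ∀ b, pvTcnt report b = pvCnt report b := by
    intro b
    rw [pvTcnt, pvCnt, PySem.List.dedup_eq_ofList, ← List.countP_eq_length_filter]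
    apply List.countP_congr
    intro r hr
    rw [hwf r ((PySem.Set.mem_ofList report r).mp hr)]
    simp
  intro r hr
  have hrr := (PySem.Set.mem_ofList report r).mp hr
  have h := hpre r hrr
  rw [hwf r hrr] at h
  simp only [Bool.and_eq_true, Bool.or_eq_true, Bool.not_eq_true', decide_eq_true_eq,
    decide_eq_false_iff_not] at h
  refine ⟨hwf r hrr, h.1, fun hp => ?_⟩
  rcases h.2 with h2 | h2
  · exfalso
    rw [pvP, decide_eq_true_eq, ← htcnt] at hp
    exact h2 hp
  · exact h2

-- A reduced to the middle form
theorem pv_A_char (id_list report : List String) (k : Int) (hpre : Pre_solution id_list report k) :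
    solution id_list report k = pvMid id_list report k := by
  have hf := pv_pre_facts id_list report k hpre
  have hwf : ∀ r ∈ PySem.Set.ofList report, pvSplit2? r = some (pvT1 r, pvT2 r) := fun r hr => (hf r hr).1
  have hndD : (PySem.Set.ofList id_list).Nodup := PySem.Set.nodup_ofList id_list
  -- keys of the grouping dict
  have hkeys_ids : (pvGroupLoop (PySem.Set.ofList report) (pvSeed id_list [])).keys = PySem.Set.ofList id_list := by
    rw [pv_group_keys _ _ hwf, pv_seed_keys]
    apply pv_update_of_subset
    intro x hx
    obtain ⟨r, hr, rfl⟩ := List.mem_map.mp hx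
    exact (PySem.Set.mem_ofList id_list _).mpr (hf r hr).2.1
  have hg : ∀ b, (pvGroupLoop (PySem.Set.ofList report) (pvSeed id_list [])).getD b []
      = ((PySem.Set.ofList report).filter (fun r => pvT2 r == b)).map pvT1 := by
    intro b
    rw [pv_group_getD _ _ _ hwf, pv_seed_getD]
    simp
  have hitems : (pvGroupLoop (PySem.Set.ofList report) (pvSeed id_list [])).items
      = (PySem.Set.ofList id_list).map (fun b => (b, ((PySem.Set.ofList report).filter (fun r => pvT2 r == b)).map pvT1)) := by
    rw [PySem.Dict.items_eq_map_keys _ (by rw [hkeys_ids]; exact hndD) [], hkeys_ids]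
    exact List.map_congr_left (fun b _ => by rw [hg])
  -- keys of the final dict
  have hkeys_cnt : (pvCntLoop k (pvGroupLoop (PySem.Set.ofList report) (pvSeed id_list [])).items (pvSeed id_list 0)).keys
      = PySem.Set.ofList id_list := by
    rw [pv_cnt_outer_keys, pv_seed_keys]
    intro p hp hkp j hj
    rw [hitems] at hp
    obtain ⟨b, _, rfl⟩ := List.mem_map.mp hp
    obtain ⟨r, hr, rfl⟩ := List.mem_map.mp hj
    have hr' := List.mem_filter.mp hr
    have hlen : ((((PySem.Set.ofList report).filter (fun r => pvT2 r == b)).map pvT1).length : Int)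
        = (pvCnt report b : Int) := by
      rw [List.length_map, pvCnt, List.countP_eq_length_filter]
    rw [pv_seed_keys]
    apply (PySem.Set.mem_ofList id_list _).mpr
    apply (hf _ hr'.1).2.2
    rw [pvP, decide_eq_true_eq]
    have hb : pvT2 r = b := by simpa using hr'.2
    rw [hb]
    rw [hlen] at hkp
    exact hkp
  -- assemble
  rw [solution, pvMid]
  rw [PySem.Dict.values_eq_map_keys _ (by rw [hkeys_cnt]; exact hndD) 0, hkeys_cnt]
  apply List.map_congr_left
  intro x _
  have hterm : ∀ b, ((fun p : String × List String => if k ≤ (p.2.length : Int) then (p.2.count x : Int) else 0) ∘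
        (fun b => (b, ((PySem.Set.ofList report).filter (fun r => pvT2 r == b)).map pvT1))) b
      = (if pvP report k b then (((PySem.Set.ofList report).countP (fun r => pvT1 r == x && pvT2 r == b)) : Int) else 0) := by
    intro b
    have hlen : ((((PySem.Set.ofList report).filter (fun r => pvT2 r == b)).map pvT1).length : Int)
        = (pvCnt report b : Int) := by
      rw [List.length_map, pvCnt, List.countP_eq_length_filter]
    have hcount : (((PySem.Set.ofList report).filter (fun r => pvT2 r == b)).map pvT1).count x
        = (PySem.Set.ofList report).countP (fun r => pvT1 r == x && pvT2 r == b) := by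
      rw [List.count, List.countP_map, List.countP_filter]
      rfl
    simp only [Function.comp, hlen, hcount, pvP, decide_eq_true_eq]
  have hmapeq := List.map_congr_left (l := PySem.Set.ofList id_list) (fun b _ => hterm b)
  rw [pv_cnt_outer, pv_seed_getD, hitems, List.map_map, hmapeq]
  rw [pv_exchange (PySem.Set.ofList id_list) hndD (pvP report k) pvT1 pvT2 x (PySem.Set.ofList report)
    (fun r hr => (PySem.Set.mem_ofList id_list _).mpr (hf r hr).2.1)]
  simp

-- B reduced to the middle form
theorem pv_B_char (id_list report : List String) (k : Int) (hpre : Pre_solution id_list report k) :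
    solution_alt id_list report k = pvMid id_list report k := by
  have hf := pv_pre_facts id_list report k hpre
  have hwf : ∀ r ∈ PySem.Set.ofList report, pvSplit2? r = some (pvT1 r, pvT2 r) := fun r hr => (hf r hr).1
  have hndD : (PySem.Set.ofList id_list).Nodup := PySem.Set.nodup_ofList id_list
  have hkeys_cnt : (pvTargetCntLoop (PySem.Set.ofList report) (pvSeed id_list 0)).keys = PySem.Set.ofList id_list := by
    rw [pv_tgtcnt_keys _ _ hwf, pv_seed_keys]
    apply pv_update_of_subset
    intro x hx
    obtain ⟨r, hr, rfl⟩ := List.mem_map.mp hx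
    exact (PySem.Set.mem_ofList id_list _).mpr (hf r hr).2.1
  have hcntD : ∀ b, (pvTargetCntLoop (PySem.Set.ofList report) (pvSeed id_list 0)).getD b 0 = (pvCnt report b : Int) := by
    intro b
    rw [pv_tgtcnt_getD _ _ _ hwf, pv_seed_getD, pvCnt]
    simp
  have hsusp : ∀ r ∈ PySem.Set.ofList report,
      PySem.Set.contains (pvSuspOf k (pvTargetCntLoop (PySem.Set.ofList report) (pvSeed id_list 0))) (pvT2 r)
        = pvP report k (pvT2 r) := by
    intro r hr
    have hmem := pv_susp_contains k (pvTargetCntLoop (PySem.Set.ofList report) (pvSeed id_list 0))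
      (by rw [hkeys_cnt]; exact hndD) (pvT2 r)
    by_cases hp : pvP report k (pvT2 r) = true
    · rw [hp]
      apply hmem.mpr
      refine ⟨by rw [hkeys_cnt]; exact (PySem.Set.mem_ofList id_list _).mpr (hf r hr).2.1, ?_⟩
      rw [hcntD]
      rw [pvP, decide_eq_true_eq] at hp
      exact hp
    · rw [Bool.not_eq_true] at hp
      rw [hp, ← Bool.not_eq_true]
      intro hc
      have hle := (hmem.mp hc).2
      rw [hcntD] at hle
      have hnot : ¬ (k ≤ (pvCnt report (pvT2 r) : Int)) := by simpa [pvP] using hp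
      exact hnot hle
  have hkeys_ans : (pvAnsLoop (pvSuspOf k (pvTargetCntLoop (PySem.Set.ofList report) (pvSeed id_list 0)))
      (PySem.Set.ofList report) (pvSeed id_list 0)).keys = PySem.Set.ofList id_list := by
    rw [pv_ansloop_keys _ _ _ hwf, pv_seed_keys]
    apply pv_update_of_subset
    intro x hx
    obtain ⟨r, hr, rfl⟩ := List.mem_map.mp hx
    have hr' := List.mem_filter.mp hr
    apply (PySem.Set.mem_ofList id_list _).mpr
    apply (hf r hr'.1).2.2
    rw [← hsusp r hr'.1]
    exact hr'.2
  rw [solution_alt, pvMid]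
  rw [PySem.Dict.values_eq_map_keys _ (by rw [hkeys_ans]; exact hndD) 0, hkeys_ans]
  apply List.map_congr_left
  intro x _
  rw [pv_ansloop_getD _ _ _ _ hwf, pv_seed_getD]
  have : (PySem.Set.ofList report).countP
        (fun r => pvT1 r == x && PySem.Set.contains (pvSuspOf k (pvTargetCntLoop (PySem.Set.ofList report) (pvSeed id_list 0))) (pvT2 r))
      = (PySem.Set.ofList report).countP (fun r => pvT1 r == x && pvP report k (pvT2 r)) := by
    apply List.countP_congr
    intro r hr
    rw [hsusp r hr]
  rw [this]
  simp

-- ===== VERDICT (by name: the statement is the Claim_ definition above) =====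
theorem solution_spec : Claim_equal_solution := by
  intro id_list report k _hdom hpre
  unfold Spec_solution
  rw [pv_A_char id_list report k hpre, pv_B_char id_list report k hpre]
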